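-- pv_equiv track=rewrite | github.com/bitsofbits/advent_of_code | 2019/day_17/pythonimp/implementation.py | condense_commands
-- ===== SOURCE A (Python) =====
-- def condense_commands(commands):
--     forward_count = 0
--     for x in commands:
--         if x in 'LR':
--             if forward_count > 0:
--                 yield str(forward_count)
--                 forward_count = 0
--             yield x
--         else:
--             forward_count += 1
--     if forward_count > 0:
--         yield str(forward_count)
-- ===== SOURCE B (Python) =====
-- def condense_commands(commands):
--     # Two-pointer run scanner: split the stream into maximal runs of
--     # same-kind commands (turn vs forward) and emit each run at once.
--     cmds = list(commands)
--     n = len(cmds)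
--     i = 0
--     while i < n:
--         k = cmds[i] in 'LR'
--         j = i + 1
--         while j < n and (cmds[j] in 'LR') == k:
--             j += 1
--         if k:
--             yield from cmds[i:j]
--         else:
--             yield str(j - i)
--         i = j
-- ===== Notes on version B (the rewrite author's own statement) =====
-- stated objective: alternative
-- what changed: Replaces A's running forward_count state machine by a two-pointer run scanner that splits the stream into maximal runs of same-kind commands and emits each run at once (turn runs element-wise, forward runs as their length).
import Mathlib
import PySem

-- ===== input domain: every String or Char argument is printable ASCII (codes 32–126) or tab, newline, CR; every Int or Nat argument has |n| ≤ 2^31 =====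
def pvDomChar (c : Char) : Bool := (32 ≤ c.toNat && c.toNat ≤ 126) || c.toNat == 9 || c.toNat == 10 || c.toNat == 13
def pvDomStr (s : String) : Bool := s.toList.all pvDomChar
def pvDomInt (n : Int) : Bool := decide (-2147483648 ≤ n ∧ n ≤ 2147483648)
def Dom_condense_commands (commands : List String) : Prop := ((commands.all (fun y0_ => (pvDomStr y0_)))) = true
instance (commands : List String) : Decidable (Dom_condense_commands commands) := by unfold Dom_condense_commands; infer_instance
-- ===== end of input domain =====

-- B replaces A's running forward_count state machine by a two-pointer run scanner
-- that splits the stream into maximal same-kind runs and emits each run at once.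

-- Python's `x in 'LR'` is substring containment: true exactly for "", "L", "R", "LR".
def pyInLR (s : String) : Bool := s = "" || s = "L" || s = "R" || s = "LR"

-- ===== PORT A =====
-- A's generator, as recursion over the command list carrying forward_count.
def condAux (commands : List String) (fc : Nat) : List String :=
  match commands with
  | [] => if fc > 0 then [PySem.Int.toStr (fc : Int)] else []
  | x :: xs =>
    if pyInLR x then
      (if fc > 0 then [PySem.Int.toStr (fc : Int), x] else [x]) ++ condAux xs 0
    else
      condAux xs (fc + 1)

def condense_commands (commands : List String) : List String := condAux commands 0

-- ===== PORT B =====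
-- inner while loop of Source B: extend the run while the key matches;
-- returns (rest of the current run, remainder), i.e. cmds[i+1:j] and cmds[j:].
def takeRun (k : Bool) : List String → List String × List String
  | [] => ([], [])
  | x :: xs =>
    if pyInLR x = k then
      let p := takeRun k xs
      (x :: p.1, p.2)
    else ([], x :: xs)

theorem takeRun_snd_length (k : Bool) (xs : List String) :
    (takeRun k xs).2.length ≤ xs.length := by
  induction xs with
  | nil => simp [takeRun]
  | cons x xs ih =>
    simp only [takeRun]
    split
    · simpa using Nat.le_succ_of_le ih
    · simp

-- outer while loop of Source B: one iteration per maximal run.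
def runScan : List String → List String
  | [] => []
  | x :: xs =>
    let k := pyInLR x
    let p := takeRun k xs
    (if k then x :: p.1 else [PySem.Int.toStr ((x :: p.1).length : Int)]) ++ runScan p.2
  termination_by cmds => cmds.length
  decreasing_by
    exact Nat.lt_succ_of_le (takeRun_snd_length _ _)

def condense_commands_alt (commands : List String) : List String := runScan commands

-- ===== PRECONDITION & SPEC =====
def Spec_condense_commands (commands : List String) (out : List String) : Prop := out = condense_commands_alt commands
instance (commands : List String) (out : List String) : Decidable (Spec_condense_commands commands out) := by unfold Spec_condense_commands; infer_instance

-- ===== CLAIM (what is proved, stated in full; the proofs are below) =====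
def Claim_equal_condense_commands : Prop := ∀ (commands : List String), Dom_condense_commands commands → Spec_condense_commands commands (condense_commands commands)

-- ===== LEMMAS AND PROOFS =====

theorem takeRun_append (k : Bool) (xs : List String) :
    (takeRun k xs).1 ++ (takeRun k xs).2 = xs := by
  induction xs with
  | nil => simp [takeRun]
  | cons x xs ih =>
    simp only [takeRun]
    split
    · simpa using ih
    · simp

theorem takeRun_fst_key (k : Bool) (xs : List String) :
    ∀ y ∈ (takeRun k xs).1, pyInLR y = k := by
  induction xs with
  | nil => simp [takeRun]
  | cons x xs ih =>
    simp only [takeRun]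
    split
    · rename_i h
      intro y hy
      rcases List.mem_cons.mp hy with rfl | hy
      · exact h
      · exact ih y hy
    · simp

theorem takeRun_snd_head (k : Bool) (xs : List String) :
    (takeRun k xs).2 = [] ∨
      ∃ y ys, (takeRun k xs).2 = y :: ys ∧ pyInLR y ≠ k := by
  induction xs with
  | nil => simp [takeRun]
  | cons x xs ih =>
    simp only [takeRun]
    split
    · exact ih
    · rename_i h
      exact Or.inr ⟨x, xs, rfl, h⟩

-- A skips a forward run, adding its length to the counter.
theorem condAux_forward_run (g : List String) (r : List String) (fc : Nat)
    (hg : ∀ y ∈ g, pyInLR y = false) :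
    condAux (g ++ r) fc = condAux r (fc + g.length) := by
  induction g generalizing fc with
  | nil => simp
  | cons x g ih =>
    have hx : pyInLR x = false := hg x (by simp)
    simp only [List.cons_append, condAux, hx, Bool.false_eq_true, if_false]
    rw [ih (fc + 1) (fun y hy => hg y (List.mem_cons_of_mem _ hy))]
    congr 1
    simp [List.length_cons]
    omega

-- with a zero counter A copies a turn run verbatim.
theorem condAux_turn_run (g : List String) (r : List String)
    (hg : ∀ y ∈ g, pyInLR y = true) :
    condAux (g ++ r) 0 = g ++ condAux r 0 := by
  induction g with
  | nil => simp
  | cons x g ih =>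
    have hx : pyInLR x = true := hg x (by simp)
    simp only [List.cons_append, condAux, hx, if_true]
    rw [ih (fun y hy => hg y (List.mem_cons_of_mem _ hy))]
    simp

-- at a run boundary a positive counter is flushed first.
theorem condAux_flush (r : List String) (fc : Nat) (hfc : 0 < fc)
    (hr : r = [] ∨ ∃ y ys, r = y :: ys ∧ pyInLR y = true) :
    condAux r fc = PySem.Int.toStr (fc : Int) :: condAux r 0 := by
  rcases hr with rfl | ⟨y, ys, rfl, hy⟩
  · simp [condAux, hfc]
  · simp [condAux, hy, hfc]

theorem condAux_eq_runScan (cs : List String) : condAux cs 0 = runScan cs := by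
  induction cs using runScan.induct with
  | case1 => simp [condAux, runScan]
  | case2 x xs k p ih =>
    have ih' : condAux (takeRun (pyInLR x) xs).2 0 = runScan (takeRun (pyInLR x) xs).2 := ih
    have hsplit := takeRun_append (pyInLR x) xs
    have hkeys := takeRun_fst_key (pyInLR x) xs
    have hhead := takeRun_snd_head (pyInLR x) xs
    rw [runScan]
    by_cases hx : pyInLR x = true
    · simp only [hx, if_true]
      have e : condAux xs 0 = (takeRun true xs).1 ++ condAux (takeRun true xs).2 0 := by
        conv_lhs => rw [← hsplit, hx]
        exact condAux_turn_run _ _ (by simpa [hx] using hkeys)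
      rw [condAux]
      simp only [hx, if_true, Nat.lt_irrefl, if_false, e]
      rw [hx] at ih'
      simp [ih']
    · have hxf : pyInLR x = false := by simpa using hx
      simp only [hxf, Bool.false_eq_true, if_false]
      have e : condAux xs 1 = condAux (takeRun false xs).2 (1 + (takeRun false xs).1.length) := by
        conv_lhs => rw [← hsplit, hxf]
        exact condAux_forward_run _ _ 1 (by simpa [hxf] using hkeys)
      have hhead' : (takeRun false xs).2 = [] ∨
          ∃ y ys, (takeRun false xs).2 = y :: ys ∧ pyInLR y = true := by
        rw [hxf] at hhead
        rcases hhead with h | ⟨y, ys, hy, hne⟩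
        · exact Or.inl h
        · exact Or.inr ⟨y, ys, hy, by simpa using hne⟩
      rw [condAux]
      simp only [hxf, Bool.false_eq_true, if_false, e]
      rw [condAux_flush _ _ (by omega) hhead']
      rw [hxf] at ih'
      rw [ih']
      simp only [List.length_cons, List.cons_append, List.nil_append]
      congr 2
      push_cast
      omega

-- ===== VERDICT (by name: the statement is the Claim_ definition above) =====
theorem condense_commands_spec : Claim_equal_condense_commands := by
  intro commands _
  unfold Spec_condense_commands condense_commands condense_commands_alt
  exact condAux_eq_runScan commands
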